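-- pv_equiv track=rewrite | github.com/dramirezg-9/AI-Teacher | operation_tree.py | _levels_to_tree
-- ===== SOURCE A (Python) =====
-- def _levels_to_tree(levels: list) -> list:
--     indexes = lambda x: [y[1] for y in x]
--     indexed_tree = [indexes(x) for x in levels]
--
--     pre_tree1 = []
--     for y in indexed_tree:
--         count = 0
--         pre_tree1.append([])
--         for x in y:
--             pre_tree1[-1].append(count)
--             count += x
--
--     pre_tree2 = []
--     for y in indexed_tree:
--         count = 0
--         pre_tree2.append([])
--         for x in y:
--             count += x
--             pre_tree2[-1].append(count)
--
--     unir = lambda j: [(levels[j][i][0], pre_tree1[j][i], pre_tree2[j][i]) for i in range(len(levels[j]))]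
--     return [unir(j) for j in range(len(levels))]
-- ===== SOURCE B (Python) =====
-- def _levels_to_tree(levels: list) -> list:
--     tree = []
--     for level in levels:
--         count = 0
--         row = []
--         for el in level:
--             row.append((el[0], count, count + el[1]))
--             count += el[1]
--         tree.append(row)
--     return tree
-- ===== Notes on version B (the rewrite author's own statement) =====
-- stated objective: simpler
-- what changed: One fused pass per level with a single running total replaces A's two separate prefix-sum passes plus an index-based zip pass (and the intermediate indexed_tree/pre_tree1/pre_tree2 lists disappear).
import Mathlib
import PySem

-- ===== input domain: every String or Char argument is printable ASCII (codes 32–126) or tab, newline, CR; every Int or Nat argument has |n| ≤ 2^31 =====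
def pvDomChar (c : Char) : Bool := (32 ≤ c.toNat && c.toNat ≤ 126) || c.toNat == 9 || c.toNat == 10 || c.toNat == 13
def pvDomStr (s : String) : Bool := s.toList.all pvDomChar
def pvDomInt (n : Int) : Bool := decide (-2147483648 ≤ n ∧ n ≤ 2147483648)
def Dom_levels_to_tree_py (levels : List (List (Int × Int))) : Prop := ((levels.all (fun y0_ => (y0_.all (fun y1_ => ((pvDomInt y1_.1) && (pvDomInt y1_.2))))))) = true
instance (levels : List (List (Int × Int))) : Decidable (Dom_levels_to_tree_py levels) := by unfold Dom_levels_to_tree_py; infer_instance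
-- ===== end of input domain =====

-- B fuses A's two prefix-sum passes and the zip pass into one pass per level (objective: simpler).

-- ===== PORT A =====
-- step of A's first loop body: append current count, then count += x
def pvStep1 (acc : List Int × Int) (x : Int) : List Int × Int := (acc.1 ++ [acc.2], acc.2 + x)
-- step of A's second loop body: count += x, then append count
def pvStep2 (acc : List Int × Int) (x : Int) : List Int × Int := (acc.1 ++ [acc.2 + x], acc.2 + x)

def levels_to_tree_py (levels : List (List (Int × Int))) : List (List (Int × Int × Int)) :=
  let indexed_tree := levels.map (fun x => x.map (fun y => y.2))
  let pre_tree1 := indexed_tree.map (fun y => (y.foldl pvStep1 ([], 0)).1)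
  let pre_tree2 := indexed_tree.map (fun y => (y.foldl pvStep2 ([], 0)).1)
  (List.range levels.length).map (fun j =>
    (List.range (levels.getD j []).length).map (fun i =>
      (((levels.getD j []).getD i (0, 0)).1,
       (pre_tree1.getD j []).getD i 0,
       (pre_tree2.getD j []).getD i 0)))

-- ===== PORT B =====
-- B's inner loop: one running count, one row
def pvRowStep (acc : List (Int × Int × Int) × Int) (el : Int × Int) : List (Int × Int × Int) × Int :=
  (acc.1 ++ [(el.1, acc.2, acc.2 + el.2)], acc.2 + el.2)

def levels_to_tree_py_alt (levels : List (List (Int × Int))) : List (List (Int × Int × Int)) :=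
  levels.foldl (fun tree level => tree ++ [(level.foldl pvRowStep ([], 0)).1]) []

-- ===== PRECONDITION & SPEC =====
def Spec_levels_to_tree_py (levels : List (List (Int × Int))) (out : List (List (Int × Int × Int))) : Prop := out = levels_to_tree_py_alt levels
instance (levels : List (List (Int × Int))) (out : List (List (Int × Int × Int))) : Decidable (Spec_levels_to_tree_py levels out) := by unfold Spec_levels_to_tree_py; infer_instance

-- ===== CLAIM (what is proved, stated in full; the proofs are below) =====
def Claim_equal_levels_to_tree_py : Prop := ∀ (levels : List (List (Int × Int))), Dom_levels_to_tree_py levels → Spec_levels_to_tree_py levels (levels_to_tree_py levels)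

-- ===== LEMMAS AND PROOFS =====

-- simple-recursion views of the three loops (accumulator made explicit)
def pvF1 (c : Int) : List Int → List Int
  | [] => []
  | x :: t => c :: pvF1 (c + x) t

def pvF2 (c : Int) : List Int → List Int
  | [] => []
  | x :: t => (c + x) :: pvF2 (c + x) t

def pvH (c : Int) : List (Int × Int) → List (Int × Int × Int)
  | [] => []
  | el :: t => (el.1, c, c + el.2) :: pvH (c + el.2) t

theorem pvFoldl1_eq (y : List Int) : ∀ (acc : List Int) (c : Int),
    (y.foldl pvStep1 (acc, c)).1 = acc ++ pvF1 c y := by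
  induction y with
  | nil => intro acc c; simp [pvF1]
  | cons x t ih =>
    intro acc c
    simp only [List.foldl_cons, pvStep1, pvF1, ih, List.append_assoc, List.singleton_append]

theorem pvFoldl2_eq (y : List Int) : ∀ (acc : List Int) (c : Int),
    (y.foldl pvStep2 (acc, c)).1 = acc ++ pvF2 c y := by
  induction y with
  | nil => intro acc c; simp [pvF2]
  | cons x t ih =>
    intro acc c
    simp only [List.foldl_cons, pvStep2, pvF2, ih, List.append_assoc, List.singleton_append]

theorem pvFoldlRow_eq (lvl : List (Int × Int)) : ∀ (acc : List (Int × Int × Int)) (c : Int),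
    (lvl.foldl pvRowStep (acc, c)).1 = acc ++ pvH c lvl := by
  induction lvl with
  | nil => intro acc c; simp [pvH]
  | cons el t ih =>
    intro acc c
    simp only [List.foldl_cons, pvRowStep, pvH, ih, List.append_assoc, List.singleton_append]

-- the fused row equals the indexwise combination of the two prefix lists
theorem pvRow_eq (lvl : List (Int × Int)) : ∀ (c : Int),
    (List.range lvl.length).map (fun i =>
      ((lvl.getD i (0, 0)).1,
       (pvF1 c (lvl.map (fun y => y.2))).getD i 0,
       (pvF2 c (lvl.map (fun y => y.2))).getD i 0)) = pvH c lvl := by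
  induction lvl with
  | nil => intro c; simp [pvH]
  | cons el t ih =>
    intro c
    rw [List.length_cons, List.range_succ_eq_map, List.map_cons, List.map_map]
    simp only [pvH]
    refine List.cons_eq_cons.mpr ⟨by simp [pvF1, pvF2], ?_⟩
    simpa only [Function.comp_def, List.getD_cons_succ, List.map_cons, pvF1, pvF2]
      using ih (c + el.2)

theorem pvMain (levels : List (List (Int × Int))) :
    levels_to_tree_py levels = levels_to_tree_py_alt levels := by
  have hb : levels_to_tree_py_alt levels = levels.map (fun lvl => pvH 0 lvl) := by
    unfold levels_to_tree_py_alt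
    rw [PySem.List.foldl_append_singleton_eq_map]
    exact List.map_congr_left (fun lvl _ => pvFoldlRow_eq lvl [] 0)
  rw [hb]
  clear hb
  unfold levels_to_tree_py
  induction levels with
  | nil => simp
  | cons L T ih =>
    rw [List.length_cons, List.range_succ_eq_map, List.map_cons, List.map_cons, List.map_map]
    refine List.cons_eq_cons.mpr ⟨?_, ?_⟩
    · simp only [List.getD_cons_zero, List.map_cons, pvFoldl1_eq, pvFoldl2_eq, List.nil_append]
      exact pvRow_eq L 0
    · simpa only [Function.comp_def, List.getD_cons_succ, List.map_cons]
        using ih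

-- ===== VERDICT (by name: the statement is the Claim_ definition above) =====
theorem levels_to_tree_py_spec : Claim_equal_levels_to_tree_py := by
  intro levels _
  exact pvMain levels
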